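-- pv_equiv track=rewrite | github.com/tommaso-ballarini/R2P-GEN | pipeline/refine.py | build_negative_from_failed
-- ===== SOURCE A (Python) =====
-- def build_negative_from_failed(failed_attributes: list) -> list:
--     """
--     Costruisce negative prompts da attributi falliti (dal verify V5).
--
--     Letteratura:
--     - Negative Prompt Guidance (Ho & Salimans, 2022)
--     - SDXL Negative prompting (Podell, 2023)
--
--     Args:
--         failed_attributes: Lista di stringhe attributo mancanti
--
--     Returns:
--         Lista di stringhe per negative prompt
--     """
--     negatives = []
--
--     for attr in failed_attributes:
--         attr_lower = attr.lower()
--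
--         # Pattern matching per tipi comuni di attributi
--         if "color" in attr_lower or any(c in attr_lower for c in ["red", "blue", "green", "black", "white"]):
--             negatives.append(f"wrong color, incorrect hue")
--         elif "brand" in attr_lower or "logo" in attr_lower or "text" in attr_lower:
--             negatives.append("without brand logo, missing text, incorrect branding")
--         elif "material" in attr_lower or any(m in attr_lower for m in ["leather", "plastic", "metal", "fabric"]):
--             negatives.append(f"wrong material texture")
--         elif "pattern" in attr_lower or any(p in attr_lower for p in ["stripe", "check", "solid"]):
--             negatives.append("wrong pattern")
--         elif "shape" in attr_lower:
--             negatives.append("wrong shape, incorrect form")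
--         else:
--             # Generic: quote the missing attribute
--             negatives.append(f"missing {attr[:30]}")
--
--     # Deduplicate
--     return list(dict.fromkeys(negatives))
-- ===== SOURCE B (Python) =====
-- # B: single sliding-window scan per attribute with a hash index of all trigger
-- # keywords (keyword -> rule priority), taking the minimum-priority hit, plus
-- # online dedup with a seen-set (instead of per-keyword substring searches in an
-- # if/elif ladder followed by dict.fromkeys).
--
-- _OUT = [
--     "wrong color, incorrect hue",
--     "without brand logo, missing text, incorrect branding",
--     "wrong material texture",
--     "wrong pattern",
--     "wrong shape, incorrect form",
-- ]
--
-- _PRIO = {}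
-- for _i, _words in enumerate([
--     ["color", "red", "blue", "green", "black", "white"],
--     ["brand", "logo", "text"],
--     ["material", "leather", "plastic", "metal", "fabric"],
--     ["pattern", "stripe", "check", "solid"],
--     ["shape"],
-- ]):
--     for _w in _words:
--         _PRIO[_w] = _i
--
-- def build_negative_from_failed(failed_attributes: list) -> list:
--     seen = set()
--     result = []
--     for attr in failed_attributes:
--         s = attr.lower()
--         best = None
--         for j in range(len(s)):
--             for L in (3, 4, 5, 6, 7, 8):
--                 p = _PRIO.get(s[j:j + L])
--                 if p is not None and (best is None or p < best):
--                     best = p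
--         neg = _OUT[best] if best is not None else "missing " + attr[:30]
--         if neg not in seen:
--             seen.add(neg)
--             result.append(neg)
--     return result
-- ===== Notes on version B (the rewrite author's own statement) =====
-- stated objective: alternative
-- what changed: Instead of testing each keyword for substring containment in an if/elif ladder and deduplicating at the end, B slides a window over each lowercased attribute once, looks every window of length 3-8 up in a keyword->rule-priority hash map, keeps the minimum priority hit, and deduplicates online with a seen-set while building the result.
import Mathlib
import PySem

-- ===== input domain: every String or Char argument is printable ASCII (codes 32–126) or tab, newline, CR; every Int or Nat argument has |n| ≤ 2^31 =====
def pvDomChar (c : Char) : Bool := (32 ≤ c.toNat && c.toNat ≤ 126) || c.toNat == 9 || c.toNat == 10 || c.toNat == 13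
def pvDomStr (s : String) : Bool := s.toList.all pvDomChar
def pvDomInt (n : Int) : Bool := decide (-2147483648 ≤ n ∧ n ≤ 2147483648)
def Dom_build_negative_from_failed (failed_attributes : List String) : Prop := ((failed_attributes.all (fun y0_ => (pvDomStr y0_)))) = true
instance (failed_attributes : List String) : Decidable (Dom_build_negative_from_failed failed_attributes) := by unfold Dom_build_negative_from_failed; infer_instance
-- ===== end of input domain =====

-- B replaces A's per-keyword substring tests in an if/elif ladder plus final dedup by a single
-- sliding-window scan per attribute against a keyword->priority hash map (keeping the minimum
-- priority hit) with online seen-set dedup: an alternative algorithm of similar cost.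

-- ===== PORT A =====
def build_negative_from_failed (failed_attributes : List String) : List String :=
  let negatives :=
    failed_attributes.foldl (fun negatives attr =>
      let attr_lower := PySem.Str.lower attr
      if PySem.Str.isIn "color" attr_lower ||
         (["red", "blue", "green", "black", "white"].any (fun c => PySem.Str.isIn c attr_lower)) then
        negatives ++ ["wrong color, incorrect hue"]
      else if PySem.Str.isIn "brand" attr_lower || PySem.Str.isIn "logo" attr_lower ||
              PySem.Str.isIn "text" attr_lower then
        negatives ++ ["without brand logo, missing text, incorrect branding"]
      else if PySem.Str.isIn "material" attr_lower ||
              (["leather", "plastic", "metal", "fabric"].any (fun m => PySem.Str.isIn m attr_lower)) then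
        negatives ++ ["wrong material texture"]
      else if PySem.Str.isIn "pattern" attr_lower ||
              (["stripe", "check", "solid"].any (fun p => PySem.Str.isIn p attr_lower)) then
        negatives ++ ["wrong pattern"]
      else if PySem.Str.isIn "shape" attr_lower then
        negatives ++ ["wrong shape, incorrect form"]
      else
        negatives ++ ["missing " ++ PySem.Str.slice attr none (some 30)]) []
  PySem.List.dedup negatives

-- ===== PORT B =====
-- module-level constants of Source B (the _PRIO dict is built once at import time; its value is this literal)
def pvOut : List String :=
  ["wrong color, incorrect hue",
   "without brand logo, missing text, incorrect branding",
   "wrong material texture",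
   "wrong pattern",
   "wrong shape, incorrect form"]

def pvPrio : PySem.Dict String Int :=
  PySem.Dict.ofList
    [("color", 0), ("red", 0), ("blue", 0), ("green", 0), ("black", 0), ("white", 0),
     ("brand", 1), ("logo", 1), ("text", 1),
     ("material", 2), ("leather", 2), ("plastic", 2), ("metal", 2), ("fabric", 2),
     ("pattern", 3), ("stripe", 3), ("check", 3), ("solid", 3),
     ("shape", 4)]

-- the inner double loop of Source B: slide a window over s, look each window up in _PRIO, keep min
def pvBest (s : String) : Option Int :=
  (PySem.List.pyRange 0 (PySem.Str.len s) 1).foldl (fun best j =>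
    ([3, 4, 5, 6, 7, 8] : List Int).foldl (fun best L =>
      match pvPrio.get? (PySem.Str.slice s (some j) (some (j + L))) with
      | none => best
      | some p =>
        match best with
        | none => some p
        | some b => if p < b then some p else best) best) none

def pvClassifyB (attr : String) : String :=
  let s := PySem.Str.lower attr
  match pvBest s with
  | some b => PySem.List.pyGetD pvOut b ""   -- _OUT[best]; best is always a valid index 0..4
  | none => "missing " ++ PySem.Str.slice attr none (some 30)

def build_negative_from_failed_alt (failed_attributes : List String) : List String :=
  (failed_attributes.foldl (fun (acc : PySem.Set String × List String) attr =>
      let neg := pvClassifyB attr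
      if PySem.Set.contains acc.1 neg then acc
      else (PySem.Set.add acc.1 neg, acc.2 ++ [neg]))
    (PySem.Set.empty, [])).2

-- ===== PRECONDITION & SPEC =====
def Spec_build_negative_from_failed (failed_attributes : List String) (out : List String) : Prop := out = build_negative_from_failed_alt failed_attributes
instance (failed_attributes : List String) (out : List String) : Decidable (Spec_build_negative_from_failed failed_attributes out) := by unfold Spec_build_negative_from_failed; infer_instance

-- ===== CLAIM (what is proved, stated in full; the proofs are below) =====
def Claim_equal_build_negative_from_failed : Prop := ∀ (failed_attributes : List String), Dom_build_negative_from_failed failed_attributes → Spec_build_negative_from_failed failed_attributes (build_negative_from_failed failed_attributes)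

-- ===== LEMMAS AND PROOFS =====

-- A's per-attribute classification, extracted from A's loop body
def pvClassifyA (attr : String) : String :=
  let attr_lower := PySem.Str.lower attr
  if PySem.Str.isIn "color" attr_lower ||
     (["red", "blue", "green", "black", "white"].any (fun c => PySem.Str.isIn c attr_lower)) then
    "wrong color, incorrect hue"
  else if PySem.Str.isIn "brand" attr_lower || PySem.Str.isIn "logo" attr_lower ||
          PySem.Str.isIn "text" attr_lower then
    "without brand logo, missing text, incorrect branding"
  else if PySem.Str.isIn "material" attr_lower ||
          (["leather", "plastic", "metal", "fabric"].any (fun m => PySem.Str.isIn m attr_lower)) then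
    "wrong material texture"
  else if PySem.Str.isIn "pattern" attr_lower ||
          (["stripe", "check", "solid"].any (fun p => PySem.Str.isIn p attr_lower)) then
    "wrong pattern"
  else if PySem.Str.isIn "shape" attr_lower then
    "wrong shape, incorrect form"
  else
    "missing " ++ PySem.Str.slice attr none (some 30)

-- the 19 (keyword, priority) pairs of pvPrio as a flat list
def pvRulePairs : List (String × Int) :=
  [("color", 0), ("red", 0), ("blue", 0), ("green", 0), ("black", 0), ("white", 0),
   ("brand", 1), ("logo", 1), ("text", 1),
   ("material", 2), ("leather", 2), ("plastic", 2), ("metal", 2), ("fabric", 2),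
   ("pattern", 3), ("stripe", 3), ("check", 3), ("solid", 3),
   ("shape", 4)]

-- all priorities found by the sliding-window scan
def pvW (s : String) : List Int :=
  (PySem.List.pyRange 0 (PySem.Str.len s) 1).flatMap (fun j =>
    ([3, 4, 5, 6, 7, 8] : List Int).filterMap (fun L =>
      pvPrio.get? (PySem.Str.slice s (some j) (some (j + L)))))

-- A's per-attribute conditions, one per rule
def pvC0 (s : String) : Bool :=
  PySem.Str.isIn "color" s ||
    (["red", "blue", "green", "black", "white"].any (fun c => PySem.Str.isIn c s))
def pvC1 (s : String) : Bool :=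
  PySem.Str.isIn "brand" s || PySem.Str.isIn "logo" s || PySem.Str.isIn "text" s
def pvC2 (s : String) : Bool :=
  PySem.Str.isIn "material" s ||
    (["leather", "plastic", "metal", "fabric"].any (fun m => PySem.Str.isIn m s))
def pvC3 (s : String) : Bool :=
  PySem.Str.isIn "pattern" s ||
    (["stripe", "check", "solid"].any (fun p => PySem.Str.isIn p s))
def pvC4 (s : String) : Bool := PySem.Str.isIn "shape" s

theorem pv_omin_some (t : List Int) (x : Int) :
    t.foldl (fun best p => match best with
      | none => some p
      | some b => if p < b then some p else best) (some x) = some (t.foldl min x) := by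
  induction t generalizing x with
  | nil => rfl
  | cons y t ih =>
      by_cases h : y < x
      · have h1 : min x y = y := by omega
        simp only [List.foldl_cons, if_pos h, ih, h1]
      · have h1 : min x y = x := by omega
        simp only [List.foldl_cons, if_neg h, ih, h1]

theorem pv_omin_eq_min? (l : List Int) :
    l.foldl (fun best p => match best with
      | none => some p
      | some b => if p < b then some p else best) none =
    PySem.List.min? l (fun x => x) := by
  cases l with
  | nil => rfl
  | cons x t => rw [List.foldl_cons, pv_omin_some, PySem.List.min?_id_cons]

theorem pvBest_eq_min? (s : String) : pvBest s = PySem.List.min? (pvW s) (fun x => x) := by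
  rw [← pv_omin_eq_min?]
  unfold pvBest pvW
  rw [List.foldl_flatMap]
  simp only [List.foldl_filterMap]
  apply PySem.List.foldl_congr_mem
  intro acc j _
  apply PySem.List.foldl_congr_mem
  intro b L _
  cases pvPrio.get? (PySem.Str.slice s (some j) (some (j + L))) <;> rfl

theorem pvPrio_get?_mem {w : String} {p : Int} (h : pvPrio.get? w = some p) :
    (w, p) ∈ pvRulePairs := by
  have h2 := PySem.Dict.mem_items_of_get?_eq_some pvPrio h
  rw [show pvPrio.items = pvRulePairs from rfl] at h2
  exact h2

theorem pv_mem_pvW {s : String} {p : Int} (h : p ∈ pvW s) :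
    ∃ w, pvPrio.get? w = some p ∧ PySem.Str.isIn w s = true := by
  unfold pvW at h
  rw [List.mem_flatMap] at h
  obtain ⟨j, hj, hmem⟩ := h
  rw [List.mem_filterMap] at hmem
  obtain ⟨L, hL, hget⟩ := hmem
  refine ⟨PySem.Str.slice s (some j) (some (j + L)), hget, ?_⟩
  rw [PySem.List.mem_pyRange_one] at hj
  have hL' : 3 ≤ L := by simp at hL; omega
  rw [PySem.Str.isIn_iff_infix, PySem.Str.toList_slice]
  show PySem.List.slice s.toList (some j) (some (j + L)) <:+: s.toList
  rw [PySem.List.slice_toNat s.toList hj.1 (by omega)]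
  exact ((List.take_prefix _ _).isInfix).trans ((List.drop_suffix _ _).isInfix)

theorem pv_window_hit (s w : String) (p L : Int) (hL : L ∈ ([3, 4, 5, 6, 7, 8] : List Int))
    (hlen : (w.toList.length : Int) = L) (hin : PySem.Str.isIn w s = true)
    (hget : pvPrio.get? w = some p) : p ∈ pvW s := by
  have hin' : PySem.Chars.isIn w.toList s.toList = true := by
    rw [← PySem.Str.isIn_eq]; exact hin
  obtain ⟨j, hpre⟩ := (PySem.Chars.exists_prefix_drop_iff_isIn w.toList s.toList).mpr hin'
  have hL' : 3 ≤ L := by simp at hL; omega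
  have hw : w.toList ≠ [] := by
    intro hnil; rw [hnil] at hlen; simp at hlen; omega
  have hjlt : j < s.toList.length := by
    by_contra hc
    rw [List.drop_eq_nil_of_le (Nat.le_of_not_lt hc)] at hpre
    exact hw (List.prefix_nil.mp hpre)
  unfold pvW
  rw [List.mem_flatMap]
  refine ⟨(j : Int), ?_, ?_⟩
  · rw [PySem.List.mem_pyRange_one, PySem.Str.len_eq]
    constructor
    · positivity
    · exact_mod_cast hjlt
  · rw [List.mem_filterMap]
    refine ⟨L, hL, ?_⟩
    have hslice : PySem.Str.slice s (some (j : Int)) (some ((j : Int) + L)) = w := by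
      rw [← String.toList_inj, PySem.Str.toList_slice]
      show PySem.List.slice s.toList (some (j : Int)) (some ((j : Int) + L)) = w.toList
      have heq : ((j : Int) + L) = ((j : Int) + (w.toList.length : Int)) := by omega
      rw [heq, PySem.List.slice_natCast_add]
      exact (List.prefix_iff_eq_take.mp hpre).symm
    rw [hslice, hget]

-- every priority found by the scan comes with its rule's condition being true
theorem pvW_cases {s : String} {p : Int} (h : p ∈ pvW s) :
    (p = 0 ∧ pvC0 s = true) ∨ (p = 1 ∧ pvC1 s = true) ∨ (p = 2 ∧ pvC2 s = true) ∨
    (p = 3 ∧ pvC3 s = true) ∨ (p = 4 ∧ pvC4 s = true) := by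
  obtain ⟨w, hget, hin⟩ := pv_mem_pvW h
  have hmem := pvPrio_get?_mem hget
  fin_cases hmem <;> simp_all [pvC0, pvC1, pvC2, pvC3, pvC4]

theorem pv_mem_of_c0 {s : String} (h : pvC0 s = true) : (0 : Int) ∈ pvW s := by
  rw [pvC0, Bool.or_eq_true, List.any_eq_true] at h
  rcases h with h | ⟨w, hw, hin⟩
  · exact pv_window_hit s "color" 0 5 (by decide) (by decide) h (by decide)
  · fin_cases hw
    · exact pv_window_hit s "red" 0 3 (by decide) (by decide) hin (by decide)
    · exact pv_window_hit s "blue" 0 4 (by decide) (by decide) hin (by decide)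
    · exact pv_window_hit s "green" 0 5 (by decide) (by decide) hin (by decide)
    · exact pv_window_hit s "black" 0 5 (by decide) (by decide) hin (by decide)
    · exact pv_window_hit s "white" 0 5 (by decide) (by decide) hin (by decide)

theorem pv_mem_of_c1 {s : String} (h : pvC1 s = true) : (1 : Int) ∈ pvW s := by
  rw [pvC1, Bool.or_eq_true, Bool.or_eq_true] at h
  rcases h with (h | h) | h
  · exact pv_window_hit s "brand" 1 5 (by decide) (by decide) h (by decide)
  · exact pv_window_hit s "logo" 1 4 (by decide) (by decide) h (by decide)
  · exact pv_window_hit s "text" 1 4 (by decide) (by decide) h (by decide)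

theorem pv_mem_of_c2 {s : String} (h : pvC2 s = true) : (2 : Int) ∈ pvW s := by
  rw [pvC2, Bool.or_eq_true, List.any_eq_true] at h
  rcases h with h | ⟨w, hw, hin⟩
  · exact pv_window_hit s "material" 2 8 (by decide) (by decide) h (by decide)
  · fin_cases hw
    · exact pv_window_hit s "leather" 2 7 (by decide) (by decide) hin (by decide)
    · exact pv_window_hit s "plastic" 2 7 (by decide) (by decide) hin (by decide)
    · exact pv_window_hit s "metal" 2 5 (by decide) (by decide) hin (by decide)
    · exact pv_window_hit s "fabric" 2 6 (by decide) (by decide) hin (by decide)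

theorem pv_mem_of_c3 {s : String} (h : pvC3 s = true) : (3 : Int) ∈ pvW s := by
  rw [pvC3, Bool.or_eq_true, List.any_eq_true] at h
  rcases h with h | ⟨w, hw, hin⟩
  · exact pv_window_hit s "pattern" 3 7 (by decide) (by decide) h (by decide)
  · fin_cases hw
    · exact pv_window_hit s "stripe" 3 6 (by decide) (by decide) hin (by decide)
    · exact pv_window_hit s "check" 3 5 (by decide) (by decide) hin (by decide)
    · exact pv_window_hit s "solid" 3 5 (by decide) (by decide) hin (by decide)

theorem pv_mem_of_c4 {s : String} (h : pvC4 s = true) : (4 : Int) ∈ pvW s := by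
  exact pv_window_hit s "shape" 4 5 (by decide) (by decide) h (by decide)

theorem pv_min?_eq (s : String) (i : Int) (hmem : i ∈ pvW s)
    (hlb : ∀ q ∈ pvW s, i ≤ q) :
    PySem.List.min? (pvW s) (fun x => x) = some i := by
  cases hmin : PySem.List.min? (pvW s) (fun x => x) with
  | none =>
      rw [PySem.List.min?_eq_none_iff] at hmin
      rw [hmin] at hmem
      simp at hmem
  | some m =>
      have h1 := PySem.List.min?_isMin hmin i hmem
      have h2 := hlb m (PySem.List.min?_mem hmin)
      simp only [le_antisymm h1 h2]

theorem pvClassifyA_unfold (attr : String) : pvClassifyA attr =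
    (if pvC0 (PySem.Str.lower attr) then "wrong color, incorrect hue"
     else if pvC1 (PySem.Str.lower attr) then "without brand logo, missing text, incorrect branding"
     else if pvC2 (PySem.Str.lower attr) then "wrong material texture"
     else if pvC3 (PySem.Str.lower attr) then "wrong pattern"
     else if pvC4 (PySem.Str.lower attr) then "wrong shape, incorrect form"
     else "missing " ++ PySem.Str.slice attr none (some 30)) := rfl

theorem pv_classify_eq (attr : String) : pvClassifyA attr = pvClassifyB attr := by
  rw [pvClassifyA_unfold]
  simp only [pvClassifyB]
  rw [pvBest_eq_min?]
  generalize hs : PySem.Str.lower attr = s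
  by_cases h0 : pvC0 s = true
  · rw [if_pos h0, pv_min?_eq s 0 (pv_mem_of_c0 h0)
      (fun q hq => by rcases pvW_cases hq with ⟨h,_⟩|⟨h,_⟩|⟨h,_⟩|⟨h,_⟩|⟨h,_⟩ <;> omega)]
    rfl
  · rw [if_neg h0]
    by_cases h1 : pvC1 s = true
    · rw [if_pos h1, pv_min?_eq s 1 (pv_mem_of_c1 h1)
        (fun q hq => by
          rcases pvW_cases hq with ⟨h,hc⟩|⟨h,_⟩|⟨h,_⟩|⟨h,_⟩|⟨h,_⟩
          · exact absurd hc h0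
          all_goals omega)]
      rfl
    · rw [if_neg h1]
      by_cases h2 : pvC2 s = true
      · rw [if_pos h2, pv_min?_eq s 2 (pv_mem_of_c2 h2)
          (fun q hq => by
            rcases pvW_cases hq with ⟨h,hc⟩|⟨h,hc⟩|⟨h,_⟩|⟨h,_⟩|⟨h,_⟩
            · exact absurd hc h0
            · exact absurd hc h1
            all_goals omega)]
        rfl
      · rw [if_neg h2]
        by_cases h3 : pvC3 s = true
        · rw [if_pos h3, pv_min?_eq s 3 (pv_mem_of_c3 h3)
            (fun q hq => by
              rcases pvW_cases hq with ⟨h,hc⟩|⟨h,hc⟩|⟨h,hc⟩|⟨h,_⟩|⟨h,_⟩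
              · exact absurd hc h0
              · exact absurd hc h1
              · exact absurd hc h2
              all_goals omega)]
          rfl
        · rw [if_neg h3]
          by_cases h4 : pvC4 s = true
          · rw [if_pos h4, pv_min?_eq s 4 (pv_mem_of_c4 h4)
              (fun q hq => by
                rcases pvW_cases hq with ⟨h,hc⟩|⟨h,hc⟩|⟨h,hc⟩|⟨h,hc⟩|⟨h,_⟩
                · exact absurd hc h0
                · exact absurd hc h1
                · exact absurd hc h2
                · exact absurd hc h3
                all_goals omega)]
            rfl
          · rw [if_neg h4]
            have hnil : pvW s = [] := by
              rw [List.eq_nil_iff_forall_not_mem]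
              intro p hp
              rcases pvW_cases hp with ⟨_,hc⟩|⟨_,hc⟩|⟨_,hc⟩|⟨_,hc⟩|⟨_,hc⟩
              · exact h0 hc
              · exact h1 hc
              · exact h2 hc
              · exact h3 hc
              · exact h4 hc
            rw [hnil]
            rfl

theorem pv_step_eq (negatives : List String) (attr : String) :
    (let attr_lower := PySem.Str.lower attr
     if PySem.Str.isIn "color" attr_lower ||
        (["red", "blue", "green", "black", "white"].any (fun c => PySem.Str.isIn c attr_lower)) then
       negatives ++ ["wrong color, incorrect hue"]
     else if PySem.Str.isIn "brand" attr_lower || PySem.Str.isIn "logo" attr_lower ||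
             PySem.Str.isIn "text" attr_lower then
       negatives ++ ["without brand logo, missing text, incorrect branding"]
     else if PySem.Str.isIn "material" attr_lower ||
             (["leather", "plastic", "metal", "fabric"].any (fun m => PySem.Str.isIn m attr_lower)) then
       negatives ++ ["wrong material texture"]
     else if PySem.Str.isIn "pattern" attr_lower ||
             (["stripe", "check", "solid"].any (fun p => PySem.Str.isIn p attr_lower)) then
       negatives ++ ["wrong pattern"]
     else if PySem.Str.isIn "shape" attr_lower then
       negatives ++ ["wrong shape, incorrect form"]
     else
       negatives ++ ["missing " ++ PySem.Str.slice attr none (some 30)]) =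
    negatives ++ [pvClassifyA attr] := by
  show (if _ then _ else _) = _
  rw [pvClassifyA_unfold attr]
  simp only [pvC0, pvC1, pvC2, pvC3, pvC4]
  split_ifs <;> rfl

theorem pv_foldA (xs : List String) (acc : List String) :
    xs.foldl (fun negatives attr =>
      let attr_lower := PySem.Str.lower attr
      if PySem.Str.isIn "color" attr_lower ||
         (["red", "blue", "green", "black", "white"].any (fun c => PySem.Str.isIn c attr_lower)) then
        negatives ++ ["wrong color, incorrect hue"]
      else if PySem.Str.isIn "brand" attr_lower || PySem.Str.isIn "logo" attr_lower ||
              PySem.Str.isIn "text" attr_lower then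
        negatives ++ ["without brand logo, missing text, incorrect branding"]
      else if PySem.Str.isIn "material" attr_lower ||
              (["leather", "plastic", "metal", "fabric"].any (fun m => PySem.Str.isIn m attr_lower)) then
        negatives ++ ["wrong material texture"]
      else if PySem.Str.isIn "pattern" attr_lower ||
              (["stripe", "check", "solid"].any (fun p => PySem.Str.isIn p attr_lower)) then
        negatives ++ ["wrong pattern"]
      else if PySem.Str.isIn "shape" attr_lower then
        negatives ++ ["wrong shape, incorrect form"]
      else
        negatives ++ ["missing " ++ PySem.Str.slice attr none (some 30)]) acc =
    acc ++ xs.map pvClassifyA := by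
  induction xs generalizing acc with
  | nil => simp
  | cons x t ih =>
      rw [List.foldl_cons, pv_step_eq, ih, List.map_cons]
      simp

theorem pv_foldB (xs : List String) (s : List String) :
    xs.foldl (fun (acc : PySem.Set String × List String) attr =>
      let neg := pvClassifyB attr
      if PySem.Set.contains acc.1 neg then acc
      else (PySem.Set.add acc.1 neg, acc.2 ++ [neg])) (s, s) =
    ((xs.map pvClassifyB).foldl PySem.Set.add s, (xs.map pvClassifyB).foldl PySem.Set.add s) := by
  induction xs generalizing s with
  | nil => rfl
  | cons x t ih =>
      simp only [List.foldl_cons, List.map_cons]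
      rw [show (if PySem.Set.contains s (pvClassifyB x) then (s, s)
            else (PySem.Set.add s (pvClassifyB x), s ++ [pvClassifyB x])) =
          ((PySem.Set.add s (pvClassifyB x)), (PySem.Set.add s (pvClassifyB x))) from ?_, ih]
      by_cases hm : pvClassifyB x ∈ s <;> simp [PySem.Set.add, hm]

-- ===== VERDICT (by name: the statement is the Claim_ definition above) =====
theorem build_negative_from_failed_spec : Claim_equal_build_negative_from_failed := by
  intro xs _
  unfold Spec_build_negative_from_failed build_negative_from_failed build_negative_from_failed_alt
  rw [pv_foldA, show (PySem.Set.empty : PySem.Set String) = ([] : List String) from rfl,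
    pv_foldB, List.nil_append, PySem.List.dedup_eq_ofList, PySem.Set.ofList_eq_foldl,
    List.map_congr_left (fun a _ => pv_classify_eq a)]
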